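-- pv_equiv track=rewrite | github.com/pedropreto/CodeAdvent | 2023/day13.py | check_end_mirror
-- ===== SOURCE A (Python) =====
-- def check_end_mirror(array, mirrors):
--     """
--     Check if there is any mirror (just checks mirrors as columns
--     To check row mirrors, use this function with transposed
--     @return:
--     """
--     mirrors_to_keep = list(mirrors)
--     for line in array[1:]:
--         if len(mirrors_to_keep) == 0:
--             return []
--         for mirror in mirrors:
--             if not is_mirror(line, mirror) and mirror in mirrors_to_keep:
--                 mirrors_to_keep.remove(mirror)
--
--     return mirrors_to_keep
--
-- def is_mirror(string, idx_mirror):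
--     """
--     @param string: string to evaluate
--     @param idx_mirror: idx of string to mirror, if 5, mirror is between 5 and 6
--     @return: boolean
--     """
--     inc = 0
--     while True:
--         if idx_mirror - inc < 0 or idx_mirror + 1 + inc >= len(string):
--             break
--         for_char = string[idx_mirror + 1 + inc]
--         back_char = string[idx_mirror - inc]
--         if for_char != back_char:
--             # not a reflection
--             return False
--         inc += 1
--
--     return True
-- ===== SOURCE B (Python) =====
-- def is_mirror(string, idx_mirror):
--     # slice formulation: the reversed prefix ending at idx_mirror must agree
--     # with the suffix starting after it, on their overlap (zip truncates)
--     if idx_mirror < 0: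
--         return True
--     return all(a == b for a, b in zip(string[:idx_mirror + 1][::-1],
--                                       string[idx_mirror + 1:]))
--
--
-- def check_end_mirror(array, mirrors):
--     return [m for m in mirrors
--             if all(is_mirror(line, m) for line in array[1:])]
-- ===== Notes on version B (the rewrite author's own statement) =====
-- stated objective: alternative
-- what changed: B replaces A's row-outer destructive removal loop (working copy, membership/remove bookkeeping, early return) with a candidate-outer comprehension filter, and replaces the index-stepping while-loop mirror test with a slice formulation that zips the reversed prefix against the suffix.
import Mathlib
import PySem

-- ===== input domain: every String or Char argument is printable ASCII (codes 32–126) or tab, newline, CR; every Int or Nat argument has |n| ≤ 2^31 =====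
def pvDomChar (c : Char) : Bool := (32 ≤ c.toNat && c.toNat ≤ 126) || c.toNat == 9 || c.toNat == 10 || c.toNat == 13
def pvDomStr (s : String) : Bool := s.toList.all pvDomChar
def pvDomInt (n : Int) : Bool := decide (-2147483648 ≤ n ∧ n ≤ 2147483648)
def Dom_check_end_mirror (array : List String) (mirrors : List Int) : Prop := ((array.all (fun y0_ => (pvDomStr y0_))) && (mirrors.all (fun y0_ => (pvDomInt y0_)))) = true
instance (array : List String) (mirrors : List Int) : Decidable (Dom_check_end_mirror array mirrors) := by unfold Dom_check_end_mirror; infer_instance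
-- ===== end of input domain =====

-- ===== PORT A =====
-- B replaces A's row-outer destructive removal loop with a candidate-outer filter and a
-- slice-based mirror test (objective: alternative); return values proved equal on all inputs.

-- while-loop of A's is_mirror, stepping inc outward; indices are in range in the else
-- branch (0 <= idx - inc and idx + 1 + inc < length), so List.getD is exact there.
def isMirrorGoA (s : List Char) (idx : Int) (inc : Nat) : Bool :=
  if idx - inc < 0 ∨ (s.length : Int) ≤ idx + 1 + inc then true
  else
    let for_char := s.getD (idx + 1 + inc).toNat ' '
    let back_char := s.getD (idx - inc).toNat ' '
    if for_char ≠ back_char then false else isMirrorGoA s idx (inc + 1)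
termination_by s.length - inc
decreasing_by
  omega

def is_mirror (string : String) (idx_mirror : Int) : Bool :=
  isMirrorGoA string.toList idx_mirror 0

-- inner 'for mirror in mirrors' pass; 'remove' is guarded by membership, so
-- erasing the first occurrence (List.erase) is exactly Python's list.remove.
def removePassA (line : String) (mirrors keep : List Int) : List Int :=
  mirrors.foldl (fun k m => if !is_mirror line m && k.contains m then k.erase m else k) keep

-- outer 'for line in array[1:]' loop with the early return on an empty keep-list
def checkGoA (mirrors : List Int) (lines : List String) (keep : List Int) : List Int :=
  match lines with
  | [] => keep
  | line :: rest =>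
      if keep.length = 0 then []
      else checkGoA mirrors rest (removePassA line mirrors keep)

def check_end_mirror (array : List String) (mirrors : List Int) : List Int :=
  checkGoA mirrors (PySem.List.slice array (some 1) none) mirrors

-- ===== PORT B =====
-- B's mirror test: the reversed prefix string[:m+1][::-1] zipped against the suffix
-- string[m+1:]; [::-1] is List.reverse (PySem.List.slice?_none_none_neg_one).
def is_mirror_alt (string : String) (idx_mirror : Int) : Bool :=
  if idx_mirror < 0 then true
  else
    let left := (PySem.List.slice string.toList none (some (idx_mirror + 1))).reverse
    let right := PySem.List.slice string.toList (some (idx_mirror + 1)) none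
    (left.zip right).all (fun p => p.1 == p.2)

-- candidate-outer filter: keep m iff every line of array[1:] mirrors at m
def check_end_mirror_alt (array : List String) (mirrors : List Int) : List Int :=
  mirrors.filter (fun m =>
    (PySem.List.slice array (some 1) none).all (fun line => is_mirror_alt line m))

-- ===== PRECONDITION & SPEC =====
def Spec_check_end_mirror (array : List String) (mirrors : List Int) (out : List Int) : Prop := out = check_end_mirror_alt array mirrors
instance (array : List String) (mirrors : List Int) (out : List Int) : Decidable (Spec_check_end_mirror array mirrors out) := by unfold Spec_check_end_mirror; infer_instance

-- ===== CLAIM (what is proved, stated in full; the proofs are below) =====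
def Claim_equal_check_end_mirror : Prop := ∀ (array : List String) (mirrors : List Int), Dom_check_end_mirror array mirrors → Spec_check_end_mirror array mirrors (check_end_mirror array mirrors)

-- ===== LEMMAS AND PROOFS =====

-- zip-all equality is pointwise equality on the overlap
theorem zip_all_iff : ∀ (a b : List Char),
    ((a.zip b).all (fun p => p.1 == p.2)) = true ↔
      ∀ j (h1 : j < a.length) (h2 : j < b.length), a[j] = b[j] := by
  intro a
  induction a with
  | nil => intro b; simp
  | cons x xs ih =>
      intro b
      cases b with
      | nil => simp
      | cons y ys =>
          simp only [List.zip_cons_cons, List.all_cons, Bool.and_eq_true, beq_iff_eq, ih ys]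
          constructor
          · rintro ⟨hxy, h⟩ j h1 h2
            cases j with
            | zero => simpa using hxy
            | succ j => simpa using h j (by simpa using h1) (by simpa using h2)
          · intro h
            refine ⟨by simpa using h 0 (by simp) (by simp), fun j h1 h2 => ?_⟩
            simpa using h (j + 1) (by simpa using h1) (by simpa using h2)

-- characterisation of A's while-loop
theorem goA_iff (s : List Char) (idx : Int) : ∀ (inc : Nat),
    isMirrorGoA s idx inc = true ↔
      ∀ j : Nat, inc ≤ j → 0 ≤ idx - j → (idx + 1 + j : Int) < s.length →
        s.getD (idx + 1 + j).toNat ' ' = s.getD (idx - j).toNat ' ' := by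
  suffices h : ∀ (n inc : Nat), s.length ≤ inc + n →
      (isMirrorGoA s idx inc = true ↔
        ∀ j : Nat, inc ≤ j → 0 ≤ idx - j → (idx + 1 + j : Int) < s.length →
          s.getD (idx + 1 + j).toNat ' ' = s.getD (idx - j).toNat ' ') by
    exact fun inc => h s.length inc (by omega)
  intro n
  induction n with
  | zero =>
      intro inc hle
      rw [isMirrorGoA, if_pos (by omega)]
      simp only [true_iff]
      intro j hj h0 hlen
      exfalso; omega
  | succ n ih =>
      intro inc hle
      rw [isMirrorGoA]
      by_cases hstop : idx - (inc : Int) < 0 ∨ (s.length : Int) ≤ idx + 1 + inc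
      · rw [if_pos hstop]
        simp only [true_iff]
        intro j hj h0 hlen
        rcases hstop with h | h <;> omega
      · rw [if_neg hstop]
        by_cases hc : s.getD (idx + 1 + (inc : Int)).toNat ' ' = s.getD (idx - inc).toNat ' '
        · rw [if_neg (by simpa using hc), ih (inc + 1) (by omega)]
          constructor
          · intro h j hj h0 hlen
            rcases Nat.eq_or_lt_of_le hj with h' | h'
            · subst h'; exact hc
            · exact h j h' h0 hlen
          · intro h j hj h0 hlen
            exact h j (by omega) h0 hlen
        · rw [if_pos hc]
          simp only [Bool.false_eq_true, false_iff]
          intro h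
          exact hc (h inc le_rfl (by omega) (by omega))

-- the two mirror tests agree on every input
theorem is_mirror_eq (s : String) (m : Int) : is_mirror s m = is_mirror_alt s m := by
  unfold is_mirror is_mirror_alt
  by_cases hneg : m < 0
  · rw [if_pos hneg, isMirrorGoA, if_pos (by left; omega)]
  · rw [if_neg hneg]
    rw [Int.not_lt] at hneg
    simp only [PySem.List.slice_to s.toList (show (0:Int) ≤ m + 1 by omega),
      PySem.List.slice_from s.toList (show (0:Int) ≤ m + 1 by omega)]
    set l := s.toList with hl
    rw [Bool.eq_iff_iff, goA_iff, zip_all_iff]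
    set n := (m + 1).toNat with hn
    constructor
    · intro h j h0 hlen
      simp only [List.length_reverse, List.length_take] at h0
      simp only [List.length_drop] at hlen
      have hjn : j < n := by omega
      have hnl : n < l.length := by omega
      have hA := h j (Nat.zero_le j) (by omega) (by omega)
      rw [List.getD_eq_getElem l ' ' (by omega), List.getD_eq_getElem l ' ' (by omega)] at hA
      rw [List.getElem_reverse, List.getElem_take, List.getElem_drop]
      convert hA.symm using 2
      · simp only [List.length_take]
        omega
      · omega
    · intro h j hj h0 hlen
      have hjn : j < n := by omega
      have hnl : n < l.length := by omega
      have hB := h j (by simp only [List.length_reverse, List.length_take]; omega)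
        (by simp only [List.length_drop]; omega)
      rw [List.getElem_reverse, List.getElem_take, List.getElem_drop] at hB
      rw [List.getD_eq_getElem l ' ' (by omega), List.getD_eq_getElem l ' ' (by omega)]
      convert hB.symm using 2
      · omega
      · simp only [List.length_take]
        omega

-- erasing an element the filter drops anyway does not change the filter
theorem filter_erase_of_not (p : Int → Bool) (m : Int) (hm : p m = false) :
    ∀ k : List Int, (k.erase m).filter p = k.filter p := by
  intro k
  induction k with
  | nil => simp
  | cons x xs ih =>
      by_cases hx : x = m
      · subst hx
        simp [List.erase_cons_head, hm]
      · rw [List.erase_cons_tail (by simp [hx])]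
        simp [List.filter_cons, ih]

-- the per-line removal pass over all of 'mirrors' deletes exactly the failing candidates,
-- provided 'mirrors' holds at least as many copies of each failing value as 'keep'
theorem removePass_filter (p : Int → Bool) :
    ∀ (ms k : List Int),
      (∀ v, p v = false → k.count v ≤ ms.count v) →
      ms.foldl (fun k m => if !p m && k.contains m then k.erase m else k) k = k.filter p := by
  intro ms
  induction ms with
  | nil =>
      intro k h
      rw [List.foldl_nil, List.filter_eq_self.mpr]
      intro a ha
      by_contra hpa
      have hle := h a (by simpa using hpa)
      have hpos : 0 < k.count a := List.count_pos_iff.mpr ha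
      simp at hle
      omega
  | cons m ms ih =>
      intro k h
      rw [List.foldl_cons]
      by_cases hpm : p m = true
      · rw [if_neg (by simp [hpm])]
        exact ih k (fun v hv => by
          have := h v hv
          have hvm : v ≠ m := fun he => by simp [he, hpm] at hv
          rw [List.count_cons_of_ne (Ne.symm hvm)] at this
          exact this)
      · replace hpm : p m = false := by simpa using hpm
        by_cases hmem : m ∈ k
        · rw [if_pos (by simp [hpm, hmem])]
          rw [ih (k.erase m) (fun v hv => by
            have := h v hv
            by_cases hvm : v = m
            · subst hvm
              rw [List.count_erase_self]
              rw [List.count_cons_self] at this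
              omega
            · rw [List.count_erase_of_ne hvm]
              rw [List.count_cons_of_ne (Ne.symm hvm)] at this
              exact this)]
          exact filter_erase_of_not p m hpm k
        · rw [if_neg (by simp [hmem])]
          exact ih k (fun v hv => by
            have := h v hv
            by_cases hvm : v = m
            · subst hvm
              simp [List.count_eq_zero_of_not_mem hmem]
            · rw [List.count_cons_of_ne (Ne.symm hvm)] at this
              exact this)

-- the outer loop, started on any filtered keep-list, computes the conjoined filter
theorem checkGoA_filter (mirrors : List Int) :
    ∀ (lines : List String) (q : Int → Bool),
      checkGoA mirrors lines (mirrors.filter q) =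
        mirrors.filter (fun m => q m && lines.all (fun line => is_mirror line m)) := by
  intro lines
  induction lines with
  | nil =>
      intro q
      rw [checkGoA]
      exact (List.filter_congr (fun m _ => by simp)).symm
  | cons line rest ih =>
      intro q
      rw [checkGoA]
      by_cases hempty : (mirrors.filter q).length = 0
      · rw [if_pos hempty]
        have hnil : mirrors.filter q = [] := List.length_eq_zero_iff.mp hempty
        symm
        rw [List.eq_nil_iff_forall_not_mem]
        intro m hme
        simp only [List.mem_filter, Bool.and_eq_true] at hme
        have : m ∈ mirrors.filter q := List.mem_filter.mpr ⟨hme.1, hme.2.1⟩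
        simp [hnil] at this
      · rw [if_neg hempty]
        have hpass : removePassA line mirrors (mirrors.filter q) =
            mirrors.filter (fun m => q m && is_mirror line m) := by
          unfold removePassA
          rw [removePass_filter (is_mirror line) mirrors (mirrors.filter q)
            (fun v _ => List.Sublist.count_le v List.filter_sublist)]
          rw [List.filter_filter]
          exact List.filter_congr (fun m _ => by rw [Bool.and_comm])
        rw [hpass, ih (fun m => q m && is_mirror line m)]
        exact List.filter_congr (fun m _ => by rw [List.all_cons, Bool.and_assoc])

-- ===== VERDICT (by name: the statement is the Claim_ definition above) =====
theorem check_end_mirror_spec : Claim_equal_check_end_mirror := by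
  intro array mirrors _
  unfold Spec_check_end_mirror check_end_mirror check_end_mirror_alt
  have h := checkGoA_filter mirrors (PySem.List.slice array (some 1) none) (fun _ => true)
  simp only [List.filter_true, Bool.true_and] at h
  rw [h]
  exact List.filter_congr (fun m _ => by simp only [is_mirror_eq])
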